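-- pv_equiv track=rewrite | github.com/jsayri/MITx_6d86x_course | units/unit_2/combination_with_repetitions.py | get_comb_single
-- ===== SOURCE A (Python) =====
-- def get_comb_single(x, r):
--     '''
--     Return a list with the possible combination of a vector x with order "r"
--     Inputs
--     x :     list, vector with elements to combine, dimension "n"
--     r :     scalar, order of the combination, default 2
--     '''
--     cum_list = []
--     for i in range(len(x)):
--         for j in range(len(x)):
--             element = x[i]
--             rr = r - 1
--             while rr > 0:
--                 rr -= 1
--                 if j >= i:
--                     element += x[j]
--             if not (j < i) and element not in cum_list:
--                 cum_list.append(element)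
--
--     return cum_list
-- ===== SOURCE B (Python) =====
-- def get_comb_single(x, r):
--     '''
--     Return a list with the possible combination of a vector x with order "r"
--     Inputs
--     x :     list, vector with elements to combine, dimension "n"
--     r :     scalar, order of the combination, default 2
--     '''
--     k = r - 1 if r > 1 else 0
--     cands = [xi + k * xj for i, xi in enumerate(x) for xj in x[i:]]
--     return list(dict.fromkeys(cands))
-- ===== Notes on version B (the rewrite author's own statement) =====
-- stated objective: faster
-- what changed: B is two staged passes instead of A's guarded nested accumulator loop: a comprehension over enumerate(x) and the suffix slice x[i:] builds all candidates x[i] + (r-1)*x[j] in closed form (no O(r) while-loop, no skipped j<i scan), then dict.fromkeys deduplicates keeping first occurrences (no linear membership scan of the output).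
import Mathlib
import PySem

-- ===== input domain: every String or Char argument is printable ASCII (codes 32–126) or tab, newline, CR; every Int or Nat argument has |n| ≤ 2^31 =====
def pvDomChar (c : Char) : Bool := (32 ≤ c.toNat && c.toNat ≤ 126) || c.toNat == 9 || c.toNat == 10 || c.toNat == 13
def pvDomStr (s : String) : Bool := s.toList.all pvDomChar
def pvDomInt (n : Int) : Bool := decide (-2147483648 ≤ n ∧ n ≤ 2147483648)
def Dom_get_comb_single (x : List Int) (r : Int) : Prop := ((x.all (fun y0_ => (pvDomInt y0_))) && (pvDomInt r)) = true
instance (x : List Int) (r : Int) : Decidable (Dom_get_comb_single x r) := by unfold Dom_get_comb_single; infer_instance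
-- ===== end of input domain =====

-- B builds all candidates x[i] + (r-1)*x[j] (j ≥ i) in one comprehension over enumerate(x) and the
-- suffix slice x[i:] (closed form instead of A's O(r) while-loop and skipped-index scan), then
-- deduplicates in a second pass with dict.fromkeys; equivalence of the return values is proved.

-- ===== PORT A =====
-- the 'while rr > 0: rr -= 1; if j >= i: element += x[j]' loop of A, step for step
def aWhile (rr element xj : Int) (c : Bool) : Int :=
  if _h : 0 < rr then aWhile (rr - 1) (if c then element + xj else element) xj c else element
termination_by rr.toNat
decreasing_by omega

def get_comb_single (x : List Int) (r : Int) : List Int :=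
  (PySem.List.pyRange 0 (PySem.List.len x) 1).foldl (fun cum i =>
    (PySem.List.pyRange 0 (PySem.List.len x) 1).foldl (fun cum j =>
      -- x[i] / x[j]: indices from range(len(x)) are always in range, so the default is never used
      let element := aWhile (r - 1) (PySem.List.pyGetD x i 0) (PySem.List.pyGetD x j 0) (decide (i ≤ j))
      if (¬ (j < i)) ∧ element ∉ cum then cum ++ [element] else cum) cum) []

-- ===== PORT B =====
def get_comb_single_alt (x : List Int) (r : Int) : List Int :=
  let k := if r > 1 then r - 1 else 0
  let cands := (PySem.List.enumerate x 0).flatMap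
    (fun p => (PySem.List.slice x (some p.1) none).map (fun xj => p.2 + k * xj))
  PySem.List.dedup cands

-- ===== PRECONDITION & SPEC =====
def Spec_get_comb_single (x : List Int) (r : Int) (out : List Int) : Prop := out = get_comb_single_alt x r
instance (x : List Int) (r : Int) (out : List Int) : Decidable (Spec_get_comb_single x r out) := by unfold Spec_get_comb_single; infer_instance

-- ===== CLAIM (what is proved, stated in full; the proofs are below) =====
def Claim_equal_get_comb_single : Prop := ∀ (x : List Int) (r : Int), Dom_get_comb_single x r → Spec_get_comb_single x r (get_comb_single x r)

-- ===== LEMMAS AND PROOFS =====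

-- proof-side name for A's dedup step
def astep (cum : List Int) (w : Int) : List Int := if w ∉ cum then cum ++ [w] else cum

-- closed form of A's inner while-loop
theorem aWhile_eq (rr e xj : Int) (c : Bool) :
    aWhile rr e xj c = if c then e + max rr 0 * xj else e := by
  induction hn : rr.toNat generalizing rr e with
  | zero =>
    have h : ¬ 0 < rr := by omega
    have hm : max rr 0 = 0 := by omega
    rw [aWhile]; simp [h, hm]
  | succ n ih =>
    have h : 0 < rr := by omega
    rw [aWhile]
    simp only [h, dif_pos]
    rw [ih (rr - 1) _ (by omega)]
    have h1 : max (rr - 1) 0 = rr - 1 := by omega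
    have h2 : max rr 0 = rr := by omega
    cases c
    · simp
    · simp only [if_true]
      rw [h1, h2]
      ring

-- astep is PySem.Set.add on Int lists
theorem astep_eq_add (cum : List Int) (w : Int) : astep cum w = PySem.Set.add cum w := by
  rw [PySem.Set.add_eq_ite, astep]
  by_cases h : w ∈ cum <;> simp [h]

-- folding astep over a list from [] is Python's dict.fromkeys dedup
theorem foldl_astep_eq_dedup (ws : List Int) :
    ws.foldl astep [] = PySem.List.dedup ws := by
  rw [PySem.List.dedup_eq_ofList, PySem.Set.ofList_eq_foldl]
  exact PySem.List.foldl_congr_mem _ _ _ _ (fun cum w _ => astep_eq_add cum w)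

-- a nested fold is the fold over the flattened list
theorem foldl_nested_eq_flatten (vss : List (List Int)) (l : List Int) :
    vss.foldl (fun cum vs => vs.foldl astep cum) l = vss.flatten.foldl astep l := by
  induction vss generalizing l with
  | nil => rfl
  | cons vs vss ih => simp [List.foldl_append, ih]

theorem get_comb_single_eq_alt (x : List Int) (r : Int) :
    get_comb_single x r = get_comb_single_alt x r := by
  unfold get_comb_single get_comb_single_alt
  simp only [PySem.List.len_eq]
  set n : Int := (x.length : Int) with hn
  have hk : (if r > 1 then r - 1 else 0) = max (r - 1) 0 := by omega
  rw [hk]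
  set k : Int := max (r - 1) 0 with hkk
  set v : Int → Int → Int :=
    fun i j => PySem.List.pyGetD x i 0 + k * PySem.List.pyGetD x j 0 with hv
  set vss : List (List Int) :=
    (PySem.List.pyRange 0 n 1).map (fun i => (PySem.List.pyRange i n 1).map (v i)) with hvss
  -- A is the nested astep fold over the value lists vss
  have hA : (PySem.List.pyRange 0 n 1).foldl (fun cum i =>
      (PySem.List.pyRange 0 n 1).foldl (fun cum j =>
        let element := aWhile (r - 1) (PySem.List.pyGetD x i 0) (PySem.List.pyGetD x j 0) (decide (i ≤ j))
        if (¬ (j < i)) ∧ element ∉ cum then cum ++ [element] else cum) cum) []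
      = vss.foldl (fun cum vs => vs.foldl astep cum) [] := by
    rw [hvss, List.foldl_map]
    apply PySem.List.foldl_congr_mem
    intro cum i hi
    rw [PySem.List.mem_pyRange_one] at hi
    rw [List.foldl_map]
    rw [PySem.List.pyRange_one_append 0 i n hi.1 (le_of_lt hi.2), List.foldl_append]
    have hpre : (PySem.List.pyRange 0 i 1).foldl (fun cum j =>
        let element := aWhile (r - 1) (PySem.List.pyGetD x i 0) (PySem.List.pyGetD x j 0) (decide (i ≤ j))
        if (¬ (j < i)) ∧ element ∉ cum then cum ++ [element] else cum) cum = cum := by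
      rw [PySem.List.foldl_congr_mem (g := fun cum _ => cum)]
      · simp
      · intro acc j hj
        rw [PySem.List.mem_pyRange_one] at hj
        simp [hj.2]
    rw [hpre]
    apply PySem.List.foldl_congr_mem
    intro acc j hj
    rw [PySem.List.mem_pyRange_one] at hj
    have hij : i ≤ j := hj.1
    simp only [aWhile_eq, hij, decide_true, if_true, not_lt.mpr hij, not_false_iff, true_and,
      astep, hv, ← hkk]
  -- B's candidate list is vss flattened
  have hB : (PySem.List.enumerate x 0).flatMap
      (fun p => (PySem.List.slice x (some p.1) none).map (fun xj => p.2 + k * xj))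
      = vss.flatten := by
    rw [PySem.List.enumerate_eq_map_pyRange (d := 0), List.flatMap_def, List.map_map, hvss]
    simp only [PySem.List.len_eq, ← hn]
    congr 1
    apply List.map_congr_left
    intro i hi
    rw [PySem.List.mem_pyRange_one] at hi
    have h1 : (PySem.List.pyRange i n 1).map (v i)
        = ((PySem.List.pyRange i n 1).map (fun j => PySem.List.pyGetD x j 0)).map
            (fun xj => PySem.List.pyGetD x i 0 + k * xj) := by
      rw [List.map_map]; rfl
    simp only [Function.comp]
    rw [h1, hn, PySem.List.map_pyGetD_pyRange' x 0 hi.1]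
    have hcast : i = ((i.toNat : Nat) : Int) := by omega
    rw [hcast, PySem.List.slice_from_natCast, Int.toNat_natCast]
  rw [hA, foldl_nested_eq_flatten, foldl_astep_eq_dedup, hB]

-- ===== VERDICT (by name: the statement is the Claim_ definition above) =====
theorem get_comb_single_spec : Claim_equal_get_comb_single := by
  intro x r _hd
  unfold Spec_get_comb_single
  exact get_comb_single_eq_alt x r
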